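-- pv_equiv track=rewrite | github.com/altoidbox/advent-of-code | 2019/Day16/main.py | fft_round_simple3
-- ===== SOURCE A (Python) =====
-- def fft_round_simple3(signal, round_num):
--     sig_end = len(signal)
--     total = 0
--     round_num += 1
--     try:
--         add_idx = round_num - 1
--         while add_idx < sig_end:
--             idx = add_idx
--             while idx < add_idx + round_num:
--                 total += signal[idx]
--                 idx += 1
--             add_idx += 4 * round_num
--
--     except IndexError:
--         pass
--     try:
--         sub_idx = round_num - 1 + 2 * round_num
--         while sub_idx < sig_end:
--             idx = sub_idx
--             while idx < sub_idx + round_num: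
--                 total -= signal[idx]
--                 idx += 1
--             sub_idx += 4 * round_num
--     except IndexError:
--         pass
--
--     if total < 0:
--         total = -total
--     result = total % 10
--     return result
-- ===== SOURCE B (Python) =====
-- def fft_round_simple3(sig, round_num):
--     r = round_num + 1
--     base = [0, 1, 0, -1]
--     total = 0
--     for i in range(len(sig)):
--         total += sig[i] * base[((i + 1) // r) % 4]
--     return abs(total) % 10
-- ===== Notes on version B (the rewrite author's own statement) =====
-- stated objective: idiomatic
-- what changed: Replaces A's two block-jumping while-loop passes (add blocks, then subtract blocks, with a caught IndexError ending each pass) by a single uniform scan that multiplies each element by the repeating FFT pattern coefficient base[((i+1)//r) % 4].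
import Mathlib
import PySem

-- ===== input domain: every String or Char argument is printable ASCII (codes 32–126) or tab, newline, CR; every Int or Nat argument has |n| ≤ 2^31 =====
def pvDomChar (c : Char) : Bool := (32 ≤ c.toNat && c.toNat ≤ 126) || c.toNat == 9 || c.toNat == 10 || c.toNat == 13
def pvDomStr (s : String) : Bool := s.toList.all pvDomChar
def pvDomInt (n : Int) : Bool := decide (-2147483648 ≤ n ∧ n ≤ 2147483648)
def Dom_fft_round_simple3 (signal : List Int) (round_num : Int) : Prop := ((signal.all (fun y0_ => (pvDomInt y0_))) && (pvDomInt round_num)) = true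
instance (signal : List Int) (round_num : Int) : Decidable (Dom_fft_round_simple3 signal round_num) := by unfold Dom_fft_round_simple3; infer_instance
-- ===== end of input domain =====

-- B replaces A's block-jumping add/subtract scheme with one uniform pass multiplying each
-- element by the repeating pattern coefficient base[((i+1)//r)%4] (objective: idiomatic/simpler).

-- ===== PORT A =====
-- inner 'while idx < bound: total ±= signal[idx]; idx += 1' loop; sign s is +1 for the
-- add loop and -1 for the sub loop; Bool = false means IndexError was raised (caught by A).
def pvAInner (signal : List Int) (bound s idx total : Int) : Int × Bool :=
  if idx < bound then
    match PySem.List.pyGet? signal idx with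
    | none => (total, false)            -- IndexError
    | some v => pvAInner signal bound s (idx + 1) (total + s * v)
  else (total, true)
termination_by (bound - idx).toNat
decreasing_by omega

-- outer 'while add_idx < sig_end' loop; the 'r ≤ 0' guard only makes the function total:
-- there Python A loops forever (excluded by Pre_), so the returned value is never claimed.
def pvAOuter (signal : List Int) (r s addIdx total : Int) : Int :=
  if _h0 : r ≤ 0 then total
  else if _h : addIdx < (signal.length : Int) then
    match pvAInner signal (addIdx + r) s addIdx total with
    | (t, true) => pvAOuter signal r s (addIdx + 4 * r) t
    | (t, false) => t
  else total
termination_by ((signal.length : Int) - addIdx).toNat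
decreasing_by omega

def fft_round_simple3 (signal : List Int) (round_num : Int) : Int :=
  let r := round_num + 1
  let t1 := pvAOuter signal r 1 (r - 1) 0
  let t2 := pvAOuter signal r (-1) (r - 1 + 2 * r) t1
  let total := if t2 < 0 then -t2 else t2
  PySem.Int.mod total 10

-- ===== PORT B =====
-- base[((i+1)//r) % 4]; the index is always 0..3 for r ≠ 0, so .getD 0 never fires on Pre_.
def pvCoeff (r i : Int) : Int :=
  PySem.List.pyGetD ([0, 1, 0, -1] : List Int) (PySem.Int.mod (PySem.Int.floordiv (i + 1) r) 4) 0

def fft_round_simple3_alt (signal : List Int) (round_num : Int) : Int :=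
  let r := round_num + 1
  let total := (PySem.List.pyRange 0 (signal.length : Int) 1).foldl
    (fun t i => t + PySem.List.pyGetD signal i 0 * pvCoeff r i) 0
  PySem.Int.mod |total| 10

-- ===== PRECONDITION & SPEC =====
-- Pre_ excludes round_num < 0: there A never returns (its outer-loop step 4*(round_num+1) ≤ 0
-- makes both while loops run forever), and B raises ZeroDivisionError at round_num = -1.
def Pre_fft_round_simple3 (signal : List Int) (round_num : Int) : Prop := 0 ≤ round_num
instance (signal : List Int) (round_num : Int) : Decidable (Pre_fft_round_simple3 signal round_num) := by unfold Pre_fft_round_simple3; infer_instance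
def pvWitness_fft_round_simple3 : List Int × Int := ([1, 2, 3, 4, 5, 6, 7, 8], 1)

def Spec_fft_round_simple3 (signal : List Int) (round_num : Int) (out : Int) : Prop := out = fft_round_simple3_alt signal round_num
instance (signal : List Int) (round_num : Int) (out : Int) : Decidable (Spec_fft_round_simple3 signal round_num out) := by unfold Spec_fft_round_simple3; infer_instance

-- ===== CLAIM (what is proved, stated in full; the proofs are below) =====
def Claim_equal_fft_round_simple3 : Prop := ∀ (signal : List Int) (round_num : Int), Dom_fft_round_simple3 signal round_num → Pre_fft_round_simple3 signal round_num → Spec_fft_round_simple3 signal round_num (fft_round_simple3 signal round_num)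

-- ===== LEMMAS AND PROOFS =====

-- bounded sum of f over the integer interval [lo, hi)
def pvBsum (f : Int → Int) (lo hi : Int) : Int :=
  if lo < hi then f lo + pvBsum f (lo + 1) hi else 0
termination_by (hi - lo).toNat
decreasing_by omega

lemma pvBsum_of_ge (f : Int → Int) (lo hi : Int) (h : hi ≤ lo) : pvBsum f lo hi = 0 := by
  rw [pvBsum]; simp [not_lt.mpr h]

lemma pvBsum_cons (f : Int → Int) (lo hi : Int) (h : lo < hi) :
    pvBsum f lo hi = f lo + pvBsum f (lo + 1) hi := by
  rw [pvBsum]; simp [h]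

lemma pvBsum_split (f : Int → Int) (lo mid hi : Int) (h1 : lo ≤ mid) (h2 : mid ≤ hi) :
    pvBsum f lo hi = pvBsum f lo mid + pvBsum f mid hi := by
  have key : ∀ n : Nat, ∀ lo : Int, (mid - lo).toNat = n → lo ≤ mid →
      pvBsum f lo hi = pvBsum f lo mid + pvBsum f mid hi := by
    intro n
    induction n with
    | zero =>
      intro lo hn hlo
      have : mid = lo := by omega
      subst this
      rw [pvBsum_of_ge f mid mid le_rfl]; ring
    | succ k ih =>
      intro lo hn hlo
      have hlt : lo < mid := by omega
      rw [pvBsum_cons f lo hi (by omega), pvBsum_cons f lo mid hlt,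
        ih (lo + 1) (by omega) (by omega)]
      ring
  exact key (mid - lo).toNat lo rfl h1

lemma pvBsum_congr (f g : Int → Int) (lo hi : Int)
    (h : ∀ i, lo ≤ i → i < hi → f i = g i) : pvBsum f lo hi = pvBsum g lo hi := by
  have key : ∀ n : Nat, ∀ lo : Int, (hi - lo).toNat = n →
      (∀ i, lo ≤ i → i < hi → f i = g i) → pvBsum f lo hi = pvBsum g lo hi := by
    intro n
    induction n with
    | zero =>
      intro lo hn hfg
      rw [pvBsum_of_ge f lo hi (by omega), pvBsum_of_ge g lo hi (by omega)]
    | succ k ih =>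
      intro lo hn hfg
      have hlt : lo < hi := by omega
      rw [pvBsum_cons f lo hi hlt, pvBsum_cons g lo hi hlt,
        hfg lo le_rfl hlt, ih (lo + 1) (by omega) (fun i h1 h2 => hfg i (by omega) h2)]
  exact key (hi - lo).toNat lo rfl h

lemma pvBsum_zero (lo hi : Int) : pvBsum (fun _ => 0) lo hi = 0 := by
  have key : ∀ n : Nat, ∀ lo : Int, (hi - lo).toNat = n →
      pvBsum (fun _ => (0 : Int)) lo hi = 0 := by
    intro n
    induction n with
    | zero => intro lo hn; rw [pvBsum_of_ge _ lo hi (by omega)]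
    | succ k ih =>
      intro lo hn
      rw [pvBsum_cons _ lo hi (by omega), ih (lo + 1) (by omega)]
      norm_num
  exact key (hi - lo).toNat lo rfl

lemma pvBsum_add (f g : Int → Int) (lo hi : Int) :
    pvBsum (fun i => f i + g i) lo hi = pvBsum f lo hi + pvBsum g lo hi := by
  have key : ∀ n : Nat, ∀ lo : Int, (hi - lo).toNat = n →
      pvBsum (fun i => f i + g i) lo hi = pvBsum f lo hi + pvBsum g lo hi := by
    intro n
    induction n with
    | zero =>
      intro lo hn
      rw [pvBsum_of_ge _ lo hi (by omega), pvBsum_of_ge f lo hi (by omega),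
        pvBsum_of_ge g lo hi (by omega)]
      norm_num
    | succ k ih =>
      intro lo hn
      rw [pvBsum_cons _ lo hi (by omega), pvBsum_cons f lo hi (by omega),
        pvBsum_cons g lo hi (by omega), ih (lo + 1) (by omega)]
      ring
  exact key (hi - lo).toNat lo rfl


-- equation lemmas for the two loop recursions
lemma pvAInner_stop (signal : List Int) (bound s idx total : Int) (h : ¬ idx < bound) :
    pvAInner signal bound s idx total = (total, true) := by
  rw [pvAInner, if_neg h]

lemma pvAInner_err (signal : List Int) (bound s idx total : Int) (h : idx < bound)
    (hsg : PySem.List.pyGet? signal idx = none) :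
    pvAInner signal bound s idx total = (total, false) := by
  rw [pvAInner, if_pos h, hsg]

lemma pvAInner_step (signal : List Int) (bound s idx total v : Int) (h : idx < bound)
    (hsg : PySem.List.pyGet? signal idx = some v) :
    pvAInner signal bound s idx total = pvAInner signal bound s (idx + 1) (total + s * v) := by
  rw [pvAInner, if_pos h, hsg]

lemma pvAOuter_stop (signal : List Int) (r s addIdx total : Int) (h0 : ¬ r ≤ 0)
    (h : ¬ addIdx < (signal.length : Int)) : pvAOuter signal r s addIdx total = total := by
  rw [pvAOuter, dif_neg h0, dif_neg h]

lemma pvAOuter_step (signal : List Int) (r s addIdx total t : Int) (h0 : ¬ r ≤ 0)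
    (h : addIdx < (signal.length : Int))
    (hin : pvAInner signal (addIdx + r) s addIdx total = (t, true)) :
    pvAOuter signal r s addIdx total = pvAOuter signal r s (addIdx + 4 * r) t := by
  rw [pvAOuter, dif_neg h0, dif_pos h, hin]

lemma pvAOuter_err (signal : List Int) (r s addIdx total t : Int) (h0 : ¬ r ≤ 0)
    (h : addIdx < (signal.length : Int))
    (hin : pvAInner signal (addIdx + r) s addIdx total = (t, false)) :
    pvAOuter signal r s addIdx total = t := by
  rw [pvAOuter, dif_neg h0, dif_pos h, hin]

-- the term A's loop with sign s contributes at index i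
def pvSTerm (signal : List Int) (r s i : Int) : Int :=
  if pvCoeff r i = s then s * PySem.List.pyGetD signal i 0 else 0

lemma pvCoeff_formula (r q j i : Int) (hr : 1 ≤ r) (hj0 : 0 ≤ j) (hjr : j < r)
    (hi : i + 1 = r * q + j) :
    pvCoeff r i = (if q % 4 = 1 then 1 else if q % 4 = 3 then -1 else 0) := by
  have hd : PySem.Int.floordiv (i + 1) r = q :=
    (PySem.Int.floordiv_eq_iff_of_pos (by omega)).mpr ⟨by nlinarith, by nlinarith⟩
  have hm : PySem.Int.mod q 4 = q % 4 := PySem.Int.mod_eq_emod_of_pos (by norm_num)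
  have h4 : q % 4 = 0 ∨ q % 4 = 1 ∨ q % 4 = 2 ∨ q % 4 = 3 := by omega
  unfold pvCoeff
  rw [hd, hm]
  rcases h4 with h | h | h | h <;> rw [h] <;> decide

lemma pvCoeff_cases (r i : Int) : pvCoeff r i = 1 ∨ pvCoeff r i = -1 ∨ pvCoeff r i = 0 := by
  have h0 : 0 ≤ PySem.Int.mod (PySem.Int.floordiv (i + 1) r) 4 :=
    PySem.Int.mod_nonneg _ (by norm_num)
  have h1 : PySem.Int.mod (PySem.Int.floordiv (i + 1) r) 4 < 4 :=
    PySem.Int.mod_lt _ (by norm_num)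
  unfold pvCoeff
  set k := PySem.Int.mod (PySem.Int.floordiv (i + 1) r) 4 with hk
  have : k = 0 ∨ k = 1 ∨ k = 2 ∨ k = 3 := by omega
  rcases this with h | h | h | h <;> rw [h] <;> decide

lemma pvAInner_spec (signal : List Int) (bound s : Int) :
    ∀ idx total, 0 ≤ idx →
      pvAInner signal bound s idx total =
        (total + pvBsum (fun i => s * PySem.List.pyGetD signal i 0) idx (min bound (signal.length : Int)),
         decide (bound ≤ (signal.length : Int) ∨ bound ≤ idx)) := by
  have key : ∀ n : Nat, ∀ idx total : Int, (bound - idx).toNat = n → 0 ≤ idx →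
      pvAInner signal bound s idx total =
        (total + pvBsum (fun i => s * PySem.List.pyGetD signal i 0) idx (min bound (signal.length : Int)),
         decide (bound ≤ (signal.length : Int) ∨ bound ≤ idx)) := by
    intro n
    induction n with
    | zero =>
      intro idx total hn h0
      have hge : bound ≤ idx := by omega
      rw [pvAInner_stop signal bound s idx total (not_lt.mpr hge),
        pvBsum_of_ge _ _ _ (le_trans (min_le_left _ _) hge),
        decide_eq_true (Or.inr hge)]
      norm_num
    | succ k ih =>
      intro idx total hn h0
      have hlt : idx < bound := by omega
      by_cases hin : idx < (signal.length : Int)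
      · have hsome : PySem.List.pyGet? signal idx = some (PySem.List.pyGetD signal idx 0) := by
          have hn' : idx.toNat < signal.length := by omega
          have := List.getElem?_eq_getElem hn'
          simp [PySem.List.pyGet?, PySem.List.pyGetD, PySem.List.pyIdx?, h0, hin]
        rw [pvAInner_step signal bound s idx total _ hlt hsome,
          ih (idx + 1) _ (by omega) (by omega),
          pvBsum_cons _ _ _ (lt_min hlt hin)]
        have hdec : ((bound ≤ (signal.length : Int) ∨ bound ≤ idx + 1)) ↔
            ((bound ≤ (signal.length : Int) ∨ bound ≤ idx)) := by omega
        rw [Prod.mk.injEq]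
        exact ⟨by ring, by rw [decide_eq_decide.mpr hdec]⟩
      · have hnone : PySem.List.pyGet? signal idx = none := by
          simp [PySem.List.pyGet?, PySem.List.pyIdx?, h0]
          omega
        rw [pvAInner_err signal bound s idx total hlt hnone,
          pvBsum_of_ge _ _ _ (le_trans (min_le_right _ _) (by omega)),
          decide_eq_false (by omega)]
        norm_num
  intro idx total h0
  exact key (bound - idx).toNat idx total rfl h0

-- coefficient is s on the first r indices of a block starting at r*(4m+c0) - 1
lemma pvCoeff_in_block (r s c0 b m i : Int) (hr : 1 ≤ r)
    (hs : (s = 1 ∧ c0 = 1) ∨ (s = -1 ∧ c0 = 3)) (hb : b + 1 = r * (4 * m + c0))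
    (h1 : b ≤ i) (h2 : i < b + r) : pvCoeff r i = s := by
  have hf := pvCoeff_formula r (4 * m + c0) (i - b) i hr (by omega) (by omega)
    (by linear_combination hb)
  rcases hs with ⟨hs1, hc1⟩ | ⟨hs1, hc1⟩ <;> subst hs1 <;> subst hc1 <;> rw [hf] <;>
    · have : (4 * m + 1) % 4 = 1 ∧ (4 * m + 3) % 4 = 3 := by omega
      split_ifs <;> omega

-- and is never s on the remaining 3r indices of the block
lemma pvCoeff_out_block (r s c0 b m i : Int) (hr : 1 ≤ r)
    (hs : (s = 1 ∧ c0 = 1) ∨ (s = -1 ∧ c0 = 3)) (hb : b + 1 = r * (4 * m + c0))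
    (h1 : b + r ≤ i) (h2 : i < b + 4 * r) : pvCoeff r i ≠ s := by
  have hc0 : c0 = 1 ∨ c0 = 3 := by rcases hs with ⟨_, h⟩ | ⟨_, h⟩ <;> omega
  have hcase : (b + r ≤ i ∧ i < b + 2 * r) ∨ (b + 2 * r ≤ i ∧ i < b + 3 * r) ∨
      (b + 3 * r ≤ i ∧ i < b + 4 * r) := by omega
  rcases hcase with ⟨ha, hb'⟩ | ⟨ha, hb'⟩ | ⟨ha, hb'⟩
  · have hf := pvCoeff_formula r (4 * m + c0 + 1) (i - b - r) i hr (by omega) (by omega)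
      (by linear_combination hb)
    rcases hs with ⟨hs1, hc1⟩ | ⟨hs1, hc1⟩ <;> subst hs1 <;> subst hc1 <;> rw [hf] <;>
      · split_ifs <;> omega
  · have hf := pvCoeff_formula r (4 * m + c0 + 2) (i - b - 2 * r) i hr (by omega) (by omega)
      (by linear_combination hb)
    rcases hs with ⟨hs1, hc1⟩ | ⟨hs1, hc1⟩ <;> subst hs1 <;> subst hc1 <;> rw [hf] <;>
      · split_ifs <;> omega
  · have hf := pvCoeff_formula r (4 * m + c0 + 3) (i - b - 3 * r) i hr (by omega) (by omega)
      (by linear_combination hb)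
    rcases hs with ⟨hs1, hc1⟩ | ⟨hs1, hc1⟩ <;> subst hs1 <;> subst hc1 <;> rw [hf] <;>
      · split_ifs <;> omega

lemma pvAOuter_spec (signal : List Int) (r s c0 : Int) (hr : 1 ≤ r)
    (hs : (s = 1 ∧ c0 = 1) ∨ (s = -1 ∧ c0 = 3)) :
    ∀ addIdx total m, 0 ≤ m → addIdx + 1 = r * (4 * m + c0) →
      pvAOuter signal r s addIdx total =
        total + pvBsum (pvSTerm signal r s) addIdx (signal.length : Int) := by
  have key : ∀ n : Nat, ∀ addIdx total m : Int, ((signal.length : Int) - addIdx).toNat < n →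
      0 ≤ m → addIdx + 1 = r * (4 * m + c0) →
      pvAOuter signal r s addIdx total =
        total + pvBsum (pvSTerm signal r s) addIdx (signal.length : Int) := by
    intro n
    induction n with
    | zero => intro addIdx total m hn hm hb; omega
    | succ k ih =>
      intro addIdx total m hn hm hb
      have hc0pos : 1 ≤ 4 * m + c0 := by rcases hs with ⟨_, h⟩ | ⟨_, h⟩ <;> omega
      have hprod : (1 : Int) ≤ r * (4 * m + c0) := by nlinarith
      have haddnn : 0 ≤ addIdx := by omega
      by_cases hlt : addIdx < (signal.length : Int)
      case neg =>
        rw [pvAOuter_stop signal r s addIdx total (by omega) hlt,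
          pvBsum_of_ge _ _ _ (by omega)]
        ring
      case pos =>
      have hin := pvAInner_spec signal (addIdx + r) s addIdx total haddnn
      by_cases hok : addIdx + r ≤ (signal.length : Int)
      · rw [decide_eq_true (Or.inl hok), min_eq_left hok] at hin
        rw [pvAOuter_step signal r s addIdx total _ (by omega) hlt hin,
          ih (addIdx + 4 * r) _ (m + 1) (by omega) (by omega) (by linear_combination hb)]
        have e1 : pvBsum (pvSTerm signal r s) addIdx ((signal.length : Int)) =
            pvBsum (pvSTerm signal r s) addIdx (addIdx + r) +
            pvBsum (pvSTerm signal r s) (addIdx + r) ((signal.length : Int)) :=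
          pvBsum_split _ _ _ _ (by omega) hok
        have e2 : pvBsum (pvSTerm signal r s) addIdx (addIdx + r) =
            pvBsum (fun i => s * PySem.List.pyGetD signal i 0) addIdx (addIdx + r) := by
          apply pvBsum_congr
          intro i hi1 hi2
          unfold pvSTerm
          rw [if_pos (pvCoeff_in_block r s c0 addIdx m i hr hs hb hi1 hi2)]
        have e3 : pvBsum (pvSTerm signal r s) (addIdx + r) ((signal.length : Int)) =
            pvBsum (pvSTerm signal r s) (addIdx + 4 * r) ((signal.length : Int)) := by
          by_cases h4 : addIdx + 4 * r ≤ (signal.length : Int)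
          · rw [pvBsum_split (pvSTerm signal r s) (addIdx + r) (addIdx + 4 * r) _ (by omega) h4]
            have hz : pvBsum (pvSTerm signal r s) (addIdx + r) (addIdx + 4 * r) = 0 := by
              rw [pvBsum_congr _ (fun _ => 0) _ _ (fun i hi1 hi2 => by
                unfold pvSTerm
                rw [if_neg (pvCoeff_out_block r s c0 addIdx m i hr hs hb hi1 hi2)]),
                pvBsum_zero]
            rw [hz]; ring
          · have hz1 : pvBsum (pvSTerm signal r s) (addIdx + r) ((signal.length : Int)) = 0 := by
              rw [pvBsum_congr _ (fun _ => 0) _ _ (fun i hi1 hi2 => by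
                unfold pvSTerm
                rw [if_neg (pvCoeff_out_block r s c0 addIdx m i hr hs hb hi1 (by omega))]),
                pvBsum_zero]
            have hz2 : pvBsum (pvSTerm signal r s) (addIdx + 4 * r) ((signal.length : Int)) = 0 :=
              pvBsum_of_ge _ _ _ (by omega)
            rw [hz1, hz2]
        rw [e1, e2, e3]; ring
      · rw [decide_eq_false (by omega), min_eq_right (by omega)] at hin
        rw [pvAOuter_err signal r s addIdx total _ (by omega) hlt hin]
        congr 1
        apply (pvBsum_congr _ _ _ _ _).symm
        intro i hi1 hi2
        unfold pvSTerm
        rw [if_pos (pvCoeff_in_block r s c0 addIdx m i hr hs hb hi1 (by omega))]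
  intro addIdx total m hm hb
  exact key (((signal.length : Int) - addIdx).toNat + 1) addIdx total m (by omega) hm hb

lemma pvB_fold (signal : List Int) (r : Int) :
    ∀ lo acc, (PySem.List.pyRange lo (signal.length : Int) 1).foldl
        (fun t i => t + PySem.List.pyGetD signal i 0 * pvCoeff r i) acc =
      acc + pvBsum (fun i => PySem.List.pyGetD signal i 0 * pvCoeff r i) lo (signal.length : Int) := by
  have key : ∀ n : Nat, ∀ lo acc : Int, ((signal.length : Int) - lo).toNat = n →
      (PySem.List.pyRange lo (signal.length : Int) 1).foldl
        (fun t i => t + PySem.List.pyGetD signal i 0 * pvCoeff r i) acc =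
      acc + pvBsum (fun i => PySem.List.pyGetD signal i 0 * pvCoeff r i) lo (signal.length : Int) := by
    intro n
    induction n with
    | zero =>
      intro lo acc hn
      rw [PySem.List.pyRange_one_eq_nil (by omega), pvBsum_of_ge _ _ _ (by omega)]
      simp
    | succ k ih =>
      intro lo acc hn
      rw [PySem.List.pyRange_one_cons (by omega : lo < (signal.length : Int)), List.foldl_cons,
        ih (lo + 1) _ (by omega), pvBsum_cons _ lo (signal.length : Int) (by omega)]
      ring
  intro lo acc
  exact key ((signal.length : Int) - lo).toNat lo acc rfl

-- extending the start of the sTerm sum down to 0 adds only zero terms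
lemma pvSTerm_ext (signal : List Int) (r s c0 : Int) (hr : 1 ≤ r)
    (hs : (s = 1 ∧ c0 = 1) ∨ (s = -1 ∧ c0 = 3)) :
    pvBsum (pvSTerm signal r s) (r * c0 - 1) (signal.length : Int) =
      pvBsum (pvSTerm signal r s) 0 (signal.length : Int) := by
  have hc0 : c0 = 1 ∨ c0 = 3 := by rcases hs with ⟨_, h⟩ | ⟨_, h⟩ <;> omega
  have hzero : ∀ i : Int, 0 ≤ i → i < r * c0 - 1 → pvSTerm signal r s i = 0 := by
    intro i hi1 hi2
    have hcne : pvCoeff r i ≠ s := by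
      rcases hc0 with h1 | h3
      · subst h1
        have hf := pvCoeff_formula r 0 (i + 1) i hr (by omega) (by omega) (by ring)
        rcases hs with ⟨hs1, _⟩ | ⟨hs1, _⟩ <;> subst hs1 <;> rw [hf] <;> norm_num
      · subst h3
        have hq : (i + 1 < r) ∨ (r ≤ i + 1 ∧ i + 1 < 2 * r) ∨ (2 * r ≤ i + 1 ∧ i + 1 < 3 * r) := by
          omega
        rcases hs with ⟨hs1, _⟩ | ⟨hs1, hc3⟩
        · omega
        subst hs1
        rcases hq with h | ⟨ha, hb⟩ | ⟨ha, hb⟩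
        · rw [pvCoeff_formula r 0 (i + 1) i hr (by omega) (by omega) (by ring)]; norm_num
        · rw [pvCoeff_formula r 1 (i + 1 - r) i hr (by omega) (by omega) (by ring)]
          norm_num
        · rw [pvCoeff_formula r 2 (i + 1 - 2 * r) i hr (by omega) (by omega) (by ring)]
          norm_num
    unfold pvSTerm
    rw [if_neg hcne]
  by_cases hle : r * c0 - 1 ≤ (signal.length : Int)
  · have h0 : (0 : Int) ≤ r * c0 - 1 := by
      rcases hc0 with h | h <;> subst h <;> nlinarith
    rw [pvBsum_split (pvSTerm signal r s) 0 (r * c0 - 1) _ h0 hle]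
    have : pvBsum (pvSTerm signal r s) 0 (r * c0 - 1) = 0 := by
      rw [pvBsum_congr _ (fun _ => 0) _ _ (fun i h1 h2 => hzero i h1 h2), pvBsum_zero]
    rw [this]; ring
  · rw [pvBsum_of_ge _ _ _ (by omega),
      pvBsum_congr _ (fun _ => 0) _ _ (fun i h1 h2 => hzero i h1 (by omega)), pvBsum_zero]

-- ===== VERDICT (by name: the statement is the Claim_ definition above) =====
theorem fft_round_simple3_spec : Claim_equal_fft_round_simple3 := by
  intro signal round_num hdom hpre
  unfold Spec_fft_round_simple3
  unfold Pre_fft_round_simple3 at hpre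
  unfold fft_round_simple3 fft_round_simple3_alt
  simp only
  set r := round_num + 1 with hrdef
  have hr : 1 ≤ r := by omega
  have h2 := pvAOuter_spec signal r (-1) 3 hr (Or.inr ⟨rfl, rfl⟩) (r - 1 + 2 * r)
    (pvAOuter signal r 1 (r - 1) 0) 0 le_rfl (by ring)
  have h1 := pvAOuter_spec signal r 1 1 hr (Or.inl ⟨rfl, rfl⟩) (r - 1) 0 0 le_rfl (by ring)
  have e1 : pvBsum (pvSTerm signal r 1) (r - 1) (signal.length : Int) =
      pvBsum (pvSTerm signal r 1) 0 (signal.length : Int) := by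
    have h := pvSTerm_ext signal r 1 1 hr (Or.inl ⟨rfl, rfl⟩)
    rw [show r * 1 - 1 = r - 1 by ring] at h
    exact h
  have e2 : pvBsum (pvSTerm signal r (-1)) (r - 1 + 2 * r) (signal.length : Int) =
      pvBsum (pvSTerm signal r (-1)) 0 (signal.length : Int) := by
    have h := pvSTerm_ext signal r (-1) 3 hr (Or.inr ⟨rfl, rfl⟩)
    rw [show r * 3 - 1 = r - 1 + 2 * r by ring] at h
    exact h
  have esum : pvBsum (fun i => PySem.List.pyGetD signal i 0 * pvCoeff r i) 0 (signal.length : Int) =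
      pvBsum (pvSTerm signal r 1) 0 (signal.length : Int) +
      pvBsum (pvSTerm signal r (-1)) 0 (signal.length : Int) := by
    rw [← pvBsum_add]
    apply pvBsum_congr
    intro i hi1 hi2
    unfold pvSTerm
    rcases pvCoeff_cases r i with h | h | h <;> rw [h] <;> norm_num
  have habs : ∀ z : Int, (if z < 0 then -z else z) = |z| := by
    intro z
    split_ifs with h
    · exact (abs_of_neg h).symm
    · exact (abs_of_nonneg (not_lt.mp h)).symm
  rw [h2, h1, e1, e2, pvB_fold signal r 0 0, esum, habs]
  congr 1
  rw [abs_eq_abs]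
  left
  ring
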